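-- pv_equiv track=rewrite | github.com/Anatoly333/Info_tasks | Info_Anatoly/hold_em.py | kick
-- ===== SOURCE A (Python) =====
-- def kick(winners, hands):
--     mx = [0, 0]
--     hands_ = [sorted([hand[0][0], hand[1][0]], reverse=True) for hand in hands]
--     for pl in winners:
--         if hands_[pl] > mx:
--             mx = hands_[pl]
--     alife = []
--     for pl in winners:
--         if hands_[pl] == mx:
--             alife.append(pl)
--     return alife
-- ===== SOURCE B (Python) =====
-- def kick(winners, hands):
--     mx = [0, 0]
--     alife = []
--     for pl in winners:
--         h = hands[pl]
--         a, b = h[0][0], h[1][0]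
--         key = [a, b] if b <= a else [b, a]
--         if key > mx:
--             mx = key
--             alife = [pl]
--         elif key == mx:
--             alife.append(pl)
--     return alife
-- ===== Notes on version B (the rewrite author's own statement) =====
-- stated objective: alternative
-- what changed: A precomputes a sorted key for every hand into a table and then makes two passes over winners (one to find the max key, one to filter); B makes a single pass over winners, computing each winner's key lazily and maintaining the running max together with the survivor list, which is reset whenever a strictly larger key appears.
import Mathlib
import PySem

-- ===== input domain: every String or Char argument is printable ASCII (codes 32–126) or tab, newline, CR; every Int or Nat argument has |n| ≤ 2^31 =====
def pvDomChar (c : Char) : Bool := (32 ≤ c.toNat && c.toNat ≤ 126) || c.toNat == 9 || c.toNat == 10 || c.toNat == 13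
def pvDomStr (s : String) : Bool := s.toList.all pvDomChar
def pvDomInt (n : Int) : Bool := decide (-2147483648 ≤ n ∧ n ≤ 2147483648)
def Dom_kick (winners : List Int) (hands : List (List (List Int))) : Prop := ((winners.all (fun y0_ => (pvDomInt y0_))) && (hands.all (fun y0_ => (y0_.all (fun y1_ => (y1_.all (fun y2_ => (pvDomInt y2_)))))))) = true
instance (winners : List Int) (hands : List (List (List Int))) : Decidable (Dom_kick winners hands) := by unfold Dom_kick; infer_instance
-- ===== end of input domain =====

-- B replaces A's precomputed key table and two passes (max, then filter) with ONE lazy pass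
-- over winners that resets the survivor list on a new maximum (objective: alternative decomposition).

-- ===== PORT A =====
def kick (winners : List Int) (hands : List (List (List Int))) : List Int :=
  let hands_ := hands.map (fun hand =>
    PySem.List.sorted [PySem.List.pyGetD (PySem.List.pyGetD hand 0 []) 0 0,
                       PySem.List.pyGetD (PySem.List.pyGetD hand 1 []) 0 0] (fun v => v) true)
  let mx := winners.foldl (fun mx pl =>
    if mx < PySem.List.pyGetD hands_ pl [] then PySem.List.pyGetD hands_ pl [] else mx)
    ([0, 0])
  winners.foldl (fun alife pl =>
    if PySem.List.pyGetD hands_ pl [] = mx then alife ++ [pl] else alife) []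

-- ===== PORT B =====
def kick_alt (winners : List Int) (hands : List (List (List Int))) : List Int :=
  (winners.foldl (fun (st : List Int × List Int) pl =>
      let h := PySem.List.pyGetD hands pl []
      let a := PySem.List.pyGetD (PySem.List.pyGetD h 0 []) 0 0
      let b := PySem.List.pyGetD (PySem.List.pyGetD h 1 []) 0 0
      let key := if b ≤ a then [a, b] else [b, a]
      if st.1 < key then (key, [pl])
      else if key = st.1 then (st.1, st.2 ++ [pl])
      else st) (([0, 0] : List Int), ([] : List Int))).2

-- ===== PRECONDITION & SPEC =====
-- a hand Python can index as hand[0][0], hand[1][0] without raising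
def handOk (h : List (List Int)) : Bool :=
  match h with
  | c0 :: c1 :: _ => !c0.isEmpty && !c1.isEmpty
  | _ => false

-- Pre_ excludes exactly the inputs where A raises (IndexError): a hand with fewer than two
-- cards or an empty card anywhere in hands, or a player index outside range(-len,len).
def Pre_kick (winners : List Int) (hands : List (List (List Int))) : Prop :=
  (∀ h ∈ hands, handOk h = true) ∧ ∀ pl ∈ winners, PySem.Raise.InRange hands.length pl
instance (winners : List Int) (hands : List (List (List Int))) : Decidable (Pre_kick winners hands) := by unfold Pre_kick; infer_instance

def pvWitness_kick : List Int × List (List (List Int)) := ([0, 0], [[[5], [3]]])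

def Spec_kick (winners : List Int) (hands : List (List (List Int))) (out : List Int) : Prop := out = kick_alt winners hands
instance (winners : List Int) (hands : List (List (List Int))) (out : List Int) : Decidable (Spec_kick winners hands out) := by unfold Spec_kick; infer_instance

-- ===== CLAIM (what is proved, stated in full; the proofs are below) =====
def Claim_equal_kick : Prop := ∀ (winners : List Int) (hands : List (List (List Int))), Dom_kick winners hands → Pre_kick winners hands → Spec_kick winners hands (kick winners hands)

-- ===== LEMMAS AND PROOFS =====

-- B's key of the hand of player pl (the body of kick_alt's let-chain)
def bkey (hands : List (List (List Int))) (pl : Int) : List Int :=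
  let h := PySem.List.pyGetD hands pl []
  let a := PySem.List.pyGetD (PySem.List.pyGetD h 0 []) 0 0
  let b := PySem.List.pyGetD (PySem.List.pyGetD h 1 []) 0 0
  if b ≤ a then [a, b] else [b, a]

-- A's per-hand key function (the lambda inside A's map)
def kA (hand : List (List Int)) : List Int :=
  PySem.List.sorted [PySem.List.pyGetD (PySem.List.pyGetD hand 0 []) 0 0,
                     PySem.List.pyGetD (PySem.List.pyGetD hand 1 []) 0 0] (fun v => v) true

-- running maximum of the keys, as A's first loop computes it
def maxFold (g : Int → List Int) (ps : List Int) (m0 : List Int) : List Int :=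
  ps.foldl (fun m pl => if m < g pl then g pl else m) m0

lemma maxFold_le (g : Int → List Int) (ps : List Int) :
    ∀ m0 : List Int, m0 ≤ maxFold g ps m0 := by
  induction ps with
  | nil => intro m0; simp [maxFold]
  | cons p t ih =>
    intro m0
    simp only [maxFold, List.foldl_cons]
    by_cases h : m0 < g p
    · simp only [if_pos h]; exact le_of_lt (lt_of_lt_of_le h (ih (g p)))
    · simp only [if_neg h]; exact ih m0

lemma pyGetD_map_inRange {α β : Type} (f : α → β) (xs : List α) (i : Int) (d : α) (d' : β)
    (h : PySem.Raise.InRange xs.length i) :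
    PySem.List.pyGetD (xs.map f) i d' = f (PySem.List.pyGetD xs i d) := by
  simp only [PySem.Raise.InRange] at h
  by_cases h0 : 0 ≤ i
  · have hi : i < (xs.length : Int) := by omega
    rw [PySem.List.pyGetD_eq_getElem (xs.map f) d' h0 (by simpa using hi),
        PySem.List.pyGetD_eq_getElem xs d h0 hi, List.getElem_map]
  · obtain ⟨k, rfl⟩ : ∃ k : Nat, i = -(k : Int) := ⟨(-i).toNat, by omega⟩
    have hk1 : 0 < k := by omega
    have hk2 : k ≤ xs.length := by omega
    rw [PySem.List.pyGetD_neg_natCast (xs.map f) k d' hk1 (by simpa using hk2),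
        PySem.List.pyGetD_neg_natCast xs k d hk1 hk2]
    simp

lemma sorted_pair (x y : Int) :
    PySem.List.sorted [x, y] (fun v => v) true = if y ≤ x then [x, y] else [y, x] := by
  rcases le_or_gt y x with h | h
  · rw [if_pos h]
    exact PySem.List.sorted_rev_eq_self_of_pairwise _ _ (by simp [h])
  · rw [if_neg (not_le.2 h)]
    exact PySem.List.sorted_rev_eq_of_perm_of_pairwise_gt _ _ _ (List.Perm.swap _ _ _) (by simp [h])

-- under Pre_, A's precomputed key for player pl equals B's lazily computed key
lemma keyA_eq_bkey (hands : List (List (List Int))) (pl : Int)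
    (hok : ∀ h ∈ hands, handOk h = true) (hin : PySem.Raise.InRange hands.length pl) :
    PySem.List.pyGetD (hands.map kA) pl [] = bkey hands pl := by
  rw [pyGetD_map_inRange kA hands pl [] [] hin]
  unfold kA
  have hmem : PySem.List.pyGetD hands pl [] ∈ hands := PySem.List.pyGetD_mem hands [] hin
  have := hok _ hmem
  rw [sorted_pair]
  rfl

-- B's single pass, characterised: final max is A's max fold; survivors are the
-- order-preserving filter of the processed players whose key equals that max.
lemma loop_inv (g : Int → List Int) (ps : List Int) :
    ∀ (m0 al0 : List Int),
      ps.foldl (fun (st : List Int × List Int) pl =>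
          if st.1 < g pl then (g pl, [pl])
          else if g pl = st.1 then (st.1, st.2 ++ [pl])
          else st) (m0, al0)
      = (maxFold g ps m0,
         (if m0 = maxFold g ps m0 then al0 else []) ++
           ps.filter (fun pl => decide (g pl = maxFold g ps m0))) := by
  induction ps with
  | nil => intro m0 al0; simp [maxFold]
  | cons p t ih =>
    intro m0 al0
    have hM : maxFold g (p :: t) m0 = maxFold g t (if m0 < g p then g p else m0) := rfl
    by_cases hlt : m0 < g p
    · simp only [List.foldl_cons, if_pos hlt, hM, ih (g p) [p], List.filter_cons]
      have hne : m0 ≠ maxFold g t (g p) := by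
        intro he
        exact absurd (lt_of_lt_of_le hlt (maxFold_le g t (g p))) (by rw [← he]; exact lt_irrefl m0)
      rw [if_neg hne]
      by_cases hp : g p = maxFold g t (g p)
      · rw [if_pos hp]
        simp only [decide_eq_true hp, if_true, List.nil_append, List.singleton_append]
      · rw [if_neg hp]
        simp only [decide_eq_false hp, Bool.false_eq_true, if_false, List.nil_append]
    · by_cases heq : g p = m0
      · simp only [List.foldl_cons, if_neg hlt, if_pos heq, hM,
          ih m0 (al0 ++ [p]), List.filter_cons]
        by_cases hm : m0 = maxFold g t m0
        · rw [if_pos hm, if_pos hm]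
          have : decide (g p = maxFold g t m0) = true := by
            rw [heq, ← hm]; simp
          simp [this, List.append_assoc]
        · rw [if_neg hm, if_neg hm]
          have : decide (g p = maxFold g t m0) = false := by
            simp only [decide_eq_false_iff_not]
            intro hc; exact hm (by rw [← hc, heq])
          simp [this]
      · have hplt : g p < m0 := lt_of_le_of_ne (not_lt.1 hlt) heq
        simp only [List.foldl_cons, if_neg hlt, if_neg heq, hM,
          ih m0 al0, List.filter_cons]
        have : decide (g p = maxFold g t m0) = false := by
          simp only [decide_eq_false_iff_not]
          intro hc
          exact absurd (lt_of_lt_of_le hplt (maxFold_le g t m0)) (by rw [hc]; exact lt_irrefl _)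
        simp [this]

lemma kick_alt_eq_filter (winners : List Int) (hands : List (List (List Int))) :
    kick_alt winners hands
      = winners.filter (fun pl => decide (bkey hands pl = maxFold (bkey hands) winners [0, 0])) := by
  have h := loop_inv (bkey hands) winners [0, 0] []
  unfold kick_alt
  rw [show (fun (st : List Int × List Int) pl =>
      let h := PySem.List.pyGetD hands pl []
      let a := PySem.List.pyGetD (PySem.List.pyGetD h 0 []) 0 0
      let b := PySem.List.pyGetD (PySem.List.pyGetD h 1 []) 0 0
      let key := if b ≤ a then [a, b] else [b, a]
      if st.1 < key then (key, [pl])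
      else if key = st.1 then (st.1, st.2 ++ [pl])
      else st) = (fun (st : List Int × List Int) pl =>
          if st.1 < bkey hands pl then (bkey hands pl, [pl])
          else if bkey hands pl = st.1 then (st.1, st.2 ++ [pl])
          else st) from rfl]
  rw [h]
  split <;> simp

-- ===== VERDICT (by name: the statement is the Claim_ definition above) =====
theorem kick_spec : Claim_equal_kick := by
  intro winners hands _ hpre
  obtain ⟨hok, hin⟩ := hpre
  unfold Spec_kick
  rw [kick_alt_eq_filter]
  have hkey : ∀ pl ∈ winners, PySem.List.pyGetD (hands.map kA) pl [] = bkey hands pl :=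
    fun pl hpl => keyA_eq_bkey hands pl hok (hin pl hpl)
  have hkick : kick winners hands =
      winners.foldl (fun alife pl =>
        if PySem.List.pyGetD (hands.map kA) pl [] =
            winners.foldl (fun mx pl =>
              if mx < PySem.List.pyGetD (hands.map kA) pl []
              then PySem.List.pyGetD (hands.map kA) pl [] else mx) [0, 0]
        then alife ++ [pl] else alife) [] := rfl
  have hmx : winners.foldl (fun mx pl =>
      if mx < PySem.List.pyGetD (hands.map kA) pl []
      then PySem.List.pyGetD (hands.map kA) pl [] else mx) [0, 0]
      = maxFold (bkey hands) winners [0, 0] := by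
    unfold maxFold
    exact PySem.List.foldl_congr_mem winners _ _ [0, 0]
      (fun acc pl hpl => by rw [hkey pl hpl])
  rw [hkick, hmx,
    PySem.List.foldl_append_ite_eq_filter
      (fun pl => PySem.List.pyGetD (hands.map kA) pl [] = maxFold (bkey hands) winners [0, 0])
      winners []]
  simp only [List.nil_append]
  exact List.filter_congr (fun pl hpl => by rw [hkey pl hpl])
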